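-- pv_equiv track=rewrite | github.com/jomkv/truescope-api | services/translation_service.py | has_untranslated_tagalog
-- ===== SOURCE A (Python) =====
-- def has_untranslated_tagalog(text: str) -> bool:
--     """
--     Check if text still contains common Tagalog words that should have been translated.
--     """
--     tagalog_markers = [
--         "bagyo",
--         "bagyong",
--         "ang",
--         "na",
--         "sa",
--         "mga",
--         "ng",
--         "ay",
--         "pa",
--         "rin",
--         "din",
--         "lang",
--         "lamang",
--         "ayon",
--         "nitong",
--         "noong",
--     ]
--
--     text_lower = text.lower()
--     # Check for Tagalog function words that shouldn't appear in English
--     return any(f" {word} " in f" {text_lower} " for word in tagalog_markers)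
-- ===== SOURCE B (Python) =====
-- def has_untranslated_tagalog(text: str) -> bool:
--     """
--     Check if text still contains common Tagalog words that should have been translated.
--     """
--     markers = {
--         "bagyo", "bagyong", "ang", "na", "sa", "mga", "ng", "ay",
--         "pa", "rin", "din", "lang", "lamang", "ayon", "nitong", "noong",
--     }
--     return any(tok in markers for tok in text.lower().split(" "))
-- ===== Notes on version B (the rewrite author's own statement) =====
-- stated objective: idiomatic
-- what changed: Instead of scanning the padded text once per marker for a space-padded substring, B lowercases and tokenizes the text once on the single-space separator and tests each token for hash-set membership in the 16 markers.
import Mathlib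
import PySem

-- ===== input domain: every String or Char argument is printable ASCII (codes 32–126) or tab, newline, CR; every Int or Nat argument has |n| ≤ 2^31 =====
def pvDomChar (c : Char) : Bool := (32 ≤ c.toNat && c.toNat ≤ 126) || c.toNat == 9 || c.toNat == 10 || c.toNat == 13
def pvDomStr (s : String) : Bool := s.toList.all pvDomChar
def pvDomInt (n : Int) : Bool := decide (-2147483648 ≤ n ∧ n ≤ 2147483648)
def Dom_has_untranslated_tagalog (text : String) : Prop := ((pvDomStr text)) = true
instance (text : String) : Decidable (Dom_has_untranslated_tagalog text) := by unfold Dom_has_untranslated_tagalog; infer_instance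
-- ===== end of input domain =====

-- B tokenizes the lowercased text once with split(" ") and tests tokens for set membership,
-- instead of A's one padded-substring scan per marker; objective: idiomatic.

-- ===== PORT A =====
def pvTagalogMarkersA : List String :=
  ["bagyo", "bagyong", "ang", "na", "sa", "mga", "ng", "ay",
   "pa", "rin", "din", "lang", "lamang", "ayon", "nitong", "noong"]

def has_untranslated_tagalog (text : String) : Bool :=
  let text_lower := PySem.Chars.lower text.toList
  -- any(f" {word} " in f" {text_lower} " for word in tagalog_markers)
  pvTagalogMarkersA.any (fun word =>
    PySem.Chars.isIn (' ' :: word.toList ++ [' ']) (' ' :: text_lower ++ [' ']))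

-- ===== PORT B =====
def pvTagalogMarkersB : PySem.Set (List Char) :=
  PySem.Set.ofList
    ["bagyo".toList, "bagyong".toList, "ang".toList, "na".toList, "sa".toList,
     "mga".toList, "ng".toList, "ay".toList, "pa".toList, "rin".toList, "din".toList,
     "lang".toList, "lamang".toList, "ayon".toList, "nitong".toList, "noong".toList]

def has_untranslated_tagalog_alt (text : String) : Bool :=
  -- any(tok in markers for tok in text.lower().split(" "))
  ((PySem.Chars.lower text.toList).splitOn ' ').any (fun tok =>
    PySem.Set.contains pvTagalogMarkersB tok)

-- ===== PRECONDITION & SPEC =====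
def Spec_has_untranslated_tagalog (text : String) (out : Bool) : Prop := out = has_untranslated_tagalog_alt text
instance (text : String) (out : Bool) : Decidable (Spec_has_untranslated_tagalog text out) := by unfold Spec_has_untranslated_tagalog; infer_instance

-- ===== CLAIM (what is proved, stated in full; the proofs are below) =====
def Claim_equal_has_untranslated_tagalog : Prop := ∀ (text : String), Dom_has_untranslated_tagalog text → Spec_has_untranslated_tagalog text (has_untranslated_tagalog text)

-- ===== LEMMAS AND PROOFS =====

-- glue ts = ' ' :: [' '].intercalate ts ++ [' '], in a shape convenient for induction
def pvGlue : List (List Char) → List Char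
  | [] => [' ']
  | a :: r => ' ' :: a ++ pvGlue r

theorem pvGlue_eq : ∀ (a : List Char) (ts : List (List Char)),
    ' ' :: [' '].intercalate (a :: ts) ++ [' '] = pvGlue (a :: ts)
  | a, [] => by simp [pvGlue, List.intercalate]
  | a, b :: r => by
    have ih := pvGlue_eq b r
    simp only [pvGlue, List.intercalate, List.intersperse_cons₂, List.flatten_cons,
      List.append_assoc, List.cons_append] at *
    rw [← ih]
    simp

theorem pvGlue_head (ts : List (List Char)) : ∃ z, pvGlue ts = ' ' :: z := by
  cases ts <;> exact ⟨_, rfl⟩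

-- if two space-free words are each followed by a space at the same point, they are equal
theorem pvPrefix_eq : ∀ (w a z : List Char), ' ' ∉ w → ' ' ∉ a →
    w ++ [' '] <+: a ++ ' ' :: z → w = a
  | [], [], _, _, _, _ => rfl
  | [], c :: _, _, _, ha, h => by
    simp only [List.nil_append, List.cons_append, List.cons_prefix_cons] at h
    exact absurd (h.1 ▸ List.mem_cons_self) ha
  | c :: w', a, z, hw, ha, h => by
    cases a with
    | nil =>
      simp only [List.cons_append, List.nil_append, List.cons_prefix_cons] at h
      exact absurd (h.1 ▸ List.mem_cons_self) hw
    | cons d a' =>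
      simp only [List.cons_append, List.cons_prefix_cons] at h
      have := pvPrefix_eq w' a' z (fun hm => hw (List.mem_cons_of_mem _ hm))
        (fun hm => ha (List.mem_cons_of_mem _ hm)) h.2
      rw [h.1, this]

theorem pvKey_glue (w : List Char) (hw : w ≠ []) (hws : ' ' ∉ w) :
    ∀ (ts : List (List Char)), (∀ l ∈ ts, ' ' ∉ l) →
      ((' ' :: w ++ [' ']) <:+: pvGlue ts ↔ w ∈ ts)
  | [], _ => by
    constructor
    · intro h
      have hlen := h.length_le
      simp only [pvGlue, List.cons_append, List.length_cons, List.length_append] at hlen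
      omega
    · simp
  | a :: r, hfree => by
    have ha : ' ' ∉ a := hfree a List.mem_cons_self
    have hr : ∀ l ∈ r, ' ' ∉ l := fun l hl => hfree l (List.mem_cons_of_mem _ hl)
    have ih := pvKey_glue w hw hws r hr
    constructor
    · intro h
      have hdrop : ∃ j, (' ' :: w ++ [' ']) <+: (pvGlue (a :: r)).drop j :=
        (PySem.Chars.exists_prefix_drop_iff_isIn _ _).mpr
          ((PySem.Chars.isIn_iff_infix _ _).mpr h)
      obtain ⟨j, hj⟩ := hdrop
      cases j with
      | zero =>
        obtain ⟨z, hz⟩ := pvGlue_head r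
        have hj' : w ++ [' '] <+: a ++ ' ' :: z := by
          have hcons : (' ' :: (w ++ [' '])) <+: (' ' :: (a ++ ' ' :: z)) := by
            simpa [pvGlue, hz] using hj
          exact (List.cons_prefix_cons.mp hcons).2
        exact List.mem_cons.mpr (Or.inl (pvPrefix_eq w a z hws ha hj'))
      | succ i =>
        simp only [pvGlue, List.cons_append, List.drop_succ_cons] at hj
        by_cases hi : i < a.length
        · exfalso
          have hlt : i < (a ++ pvGlue r).length := by
            simp only [List.length_append]; omega
          rw [List.drop_eq_getElem_cons hlt] at hj
          have h1 : (' ' : Char) = (a ++ pvGlue r)[i] :=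
            (List.cons_prefix_cons.mp hj).1
          rw [List.getElem_append_left hi] at h1
          exact ha (by rw [h1]; exact a.getElem_mem hi)
        · have hdr : (a ++ pvGlue r).drop i = (pvGlue r).drop (i - a.length) := by
            rw [List.drop_append, List.drop_eq_nil_of_le (by omega), List.nil_append]
          rw [hdr] at hj
          have hinf : (' ' :: w ++ [' ']) <:+: pvGlue r :=
            (PySem.Chars.isIn_iff_infix _ _).mp
              ((PySem.Chars.exists_prefix_drop_iff_isIn _ _).mp ⟨_, hj⟩)
          exact List.mem_cons_of_mem _ (ih.mp hinf)
    · intro hmem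
      rcases List.mem_cons.mp hmem with heq | hmem'
      · obtain ⟨z, hz⟩ := pvGlue_head r
        subst heq
        refine List.IsPrefix.isInfix ?_
        show (' ' :: w ++ [' ']) <+: pvGlue (w :: r)
        rw [show pvGlue (w :: r) = ' ' :: w ++ pvGlue r from rfl, hz,
          show (' ' :: w ++ (' ' :: z)) = (' ' :: w ++ [' ']) ++ z by simp]
        exact List.prefix_append _ _
      · have hinf := ih.mpr hmem'
        exact hinf.trans (List.suffix_append (' ' :: a) (pvGlue r)).isInfix

-- tokens of split(" ") contain no space
theorem pvSplitOnP_free (p : Char → Bool) :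
    ∀ (t : List Char), ∀ l ∈ t.splitOnP p, ∀ c ∈ l, ¬ p c
  | [], l, hl, c, hc => by
    simp only [List.splitOnP_nil, List.mem_singleton] at hl
    subst hl
    simp at hc
  | x :: t, l, hl, c, hc => by
    rw [List.splitOnP_cons] at hl
    by_cases hp : p x
    · rw [if_pos hp] at hl
      rcases List.mem_cons.mp hl with h | h
      · subst h; simp at hc
      · exact pvSplitOnP_free p t l h c hc
    · rw [if_neg hp] at hl
      obtain ⟨h0, rest, hrest⟩ := List.exists_cons_of_ne_nil (List.splitOnP_ne_nil p t)
      rw [hrest, List.modifyHead_cons] at hl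
      rcases List.mem_cons.mp hl with h | h
      · subst h
        rcases List.mem_cons.mp hc with h | h
        · subst h; exact hp
        · exact pvSplitOnP_free p t h0 (hrest ▸ List.mem_cons_self) c h
      · exact pvSplitOnP_free p t l (hrest ▸ List.mem_cons_of_mem _ h) c hc

theorem pvSplitOn_free (t : List Char) : ∀ l ∈ t.splitOn ' ', ' ' ∉ l := by
  intro l hl hc
  exact pvSplitOnP_free (fun c => c == ' ') t l hl ' ' hc (by simp)

-- main bridge: padded-substring test = token membership
theorem pvPad_isIn_iff (w t : List Char) (hw : w ≠ []) (hws : ' ' ∉ w) :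
    PySem.Chars.isIn (' ' :: w ++ [' ']) (' ' :: t ++ [' ']) = true ↔ w ∈ t.splitOn ' ' := by
  rw [PySem.Chars.isIn_iff_infix]
  have hne : t.splitOn ' ' ≠ [] := List.splitOnP_ne_nil _ t
  obtain ⟨h0, rest, hrest⟩ := List.exists_cons_of_ne_nil hne
  have ht : [' '].intercalate (t.splitOn ' ') = t := List.intercalate_splitOn t ' '
  rw [hrest] at ht
  rw [show (' ' :: t ++ [' ']) = pvGlue (h0 :: rest) by rw [← pvGlue_eq, ht], hrest]
  exact pvKey_glue w hw hws (h0 :: rest) (hrest ▸ pvSplitOn_free t)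

-- ===== VERDICT (by name: the statement is the Claim_ definition above) =====
theorem has_untranslated_tagalog_spec : Claim_equal_has_untranslated_tagalog := by
  intro text _
  unfold Spec_has_untranslated_tagalog
  rw [Bool.eq_iff_iff]
  unfold has_untranslated_tagalog has_untranslated_tagalog_alt
  simp only [List.any_eq_true]
  have hm : ∀ w ∈ pvTagalogMarkersA, w.toList ≠ [] ∧ ' ' ∉ w.toList := by decide
  have hB : pvTagalogMarkersB = pvTagalogMarkersA.map String.toList := by decide
  have hset : ∀ x, PySem.Set.contains pvTagalogMarkersB x = true ↔
      ∃ w ∈ pvTagalogMarkersA, w.toList = x := by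
    intro x
    rw [PySem.Set.contains_iff, hB, List.mem_map]
  constructor
  · rintro ⟨word, hword, hin⟩
    obtain ⟨hne, hfree⟩ := hm word hword
    exact ⟨word.toList, (pvPad_isIn_iff _ _ hne hfree).mp hin,
      (hset _).mpr ⟨word, hword, rfl⟩⟩
  · rintro ⟨tok, htok, hcont⟩
    obtain ⟨w, hw, rfl⟩ := (hset tok).mp hcont
    obtain ⟨hne, hfree⟩ := hm w hw
    exact ⟨w, hw, (pvPad_isIn_iff _ _ hne hfree).mpr htok⟩
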